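-- pv_equiv track=rewrite | github.com/deveucatur/ninebox-streamlit | util.py | ListaCellNine
-- ===== SOURCE A (Python) =====
-- def ListaCellNine(listDadosAux, medDes, MedCom):
--     # Cria uma interface gráfica com uma grade de nine box e botões para adicionar, editar e excluir funcionários
--     top_left = [x[1] for x in listDadosAux if classify_employee(medDes, MedCom) == 'top_left']
--     top_middle = [x[1] for x in listDadosAux if classify_employee(medDes, MedCom) == 'top_middle']
--     middle_left = [x[1] for x in listDadosAux if classify_employee(medDes, MedCom) == 'middle_left']
--     middle_middle = [x[1] for x in listDadosAux if classify_employee(medDes, MedCom) == 'middle_middle']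
--     top_right = [x[1] for x in listDadosAux if classify_employee(medDes, MedCom) == 'top_right']
--     middle_right = [x[1] for x in listDadosAux if classify_employee(medDes, MedCom) == 'middle_right']
--     bottom_left = [x[1] for x in listDadosAux if classify_employee(medDes, MedCom) == 'bottom_left']
--     bottom_middle = [x[1] for x in listDadosAux if classify_employee(medDes, MedCom) == 'bottom_middle']
--     bottom_right = [x[1] for x in listDadosAux if classify_employee(medDes, MedCom) == 'bottom_right']
--
--     cell_names = ["Enigma", "Forte Potencial", "Alto Potencial", "Questionável", "Mantenedor", "Forte Desempenho",
--                   "Insuficiente", "Eficaz", "Comprometido"]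
--     cell_data = [top_left, top_middle, top_right, middle_left, middle_middle, middle_right, bottom_left, bottom_middle,
--                  bottom_right]
--
--     return cell_names, cell_data
--
-- def classify_employee(skills, behavior):
--     if behavior >= 85 and skills >= 85:
--         return "top_right"
--     elif behavior >= 85 and skills >= 70:
--         return "top_middle"
--     elif behavior >= 85 and skills < 70:
--         return "top_left"
--     elif behavior >= 70 and skills >= 85:
--         return "middle_right"
--     elif behavior >= 70 and skills >= 70:
--         return "middle_middle"
--     elif behavior >= 70 and skills < 70:
--         return "middle_left"
--     elif behavior < 70 and skills >= 85:
--         return "bottom_right"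
--     elif behavior < 70 and skills >= 70:
--         return "bottom_middle"
--     elif behavior < 70 and skills < 70:
--         return "bottom_left"
-- ===== SOURCE B (Python) =====
-- def ListaCellNine(listDadosAux, medDes, MedCom):
--     vals = [x[1] for x in listDadosAux]
--     row = 0 if MedCom >= 85 else (1 if MedCom >= 70 else 2)
--     col = 0 if medDes < 70 else (1 if medDes < 85 else 2)
--     grid = [[[], [], []], [[], [], []], [[], [], []]]
--     grid[row][col] = vals
--     cell_names = ["Enigma", "Forte Potencial", "Alto Potencial", "Questionável", "Mantenedor", "Forte Desempenho",
--                   "Insuficiente", "Eficaz", "Comprometido"]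
--     cell_data = grid[0] + grid[1] + grid[2]
--     return cell_names, cell_data
-- ===== Notes on version B (the rewrite author's own statement) =====
-- stated objective: simpler
-- what changed: Replaces nine full-list comprehensions each re-calling the 9-way elif classifier with one pass collecting vals plus two independent 1D threshold indices (row from MedCom, col from medDes) that place vals into a 3x3 grid flattened row-major.
import Mathlib
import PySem

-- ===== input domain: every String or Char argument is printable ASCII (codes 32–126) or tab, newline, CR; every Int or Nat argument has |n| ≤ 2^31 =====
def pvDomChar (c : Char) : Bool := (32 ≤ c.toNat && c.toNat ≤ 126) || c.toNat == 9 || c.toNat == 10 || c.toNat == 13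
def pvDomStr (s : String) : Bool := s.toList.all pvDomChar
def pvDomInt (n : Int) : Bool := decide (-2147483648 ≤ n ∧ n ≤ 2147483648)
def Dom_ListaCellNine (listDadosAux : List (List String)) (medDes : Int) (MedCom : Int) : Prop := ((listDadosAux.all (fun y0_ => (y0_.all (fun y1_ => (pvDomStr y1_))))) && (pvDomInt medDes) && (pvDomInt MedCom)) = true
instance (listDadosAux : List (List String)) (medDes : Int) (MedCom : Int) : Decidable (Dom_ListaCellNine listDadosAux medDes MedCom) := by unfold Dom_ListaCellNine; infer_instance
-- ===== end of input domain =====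

-- B replaces nine full-list comprehensions (each re-calling the 9-way elif classifier on the
-- same two scalars) with one pass collecting vals plus two 1D threshold indices placing vals
-- into a 3x3 grid flattened row-major (objective: simpler).

-- ===== PORT A =====
def classify_employee (skills behavior : Int) : String :=
  if behavior ≥ 85 ∧ skills ≥ 85 then "top_right"
  else if behavior ≥ 85 ∧ skills ≥ 70 then "top_middle"
  else if behavior ≥ 85 ∧ skills < 70 then "top_left"
  else if behavior ≥ 70 ∧ skills ≥ 85 then "middle_right"
  else if behavior ≥ 70 ∧ skills ≥ 70 then "middle_middle"
  else if behavior ≥ 70 ∧ skills < 70 then "middle_left"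
  else if behavior < 70 ∧ skills ≥ 85 then "bottom_right"
  else if behavior < 70 ∧ skills ≥ 70 then "bottom_middle"
  else "bottom_left"

-- one comprehension [x[1] for x in l if classify_employee(medDes,MedCom) == name];
-- x[1] via PySem.List.pyGet? (in range under Pre_, .getD "" otherwise)
def cellA (l : List (List String)) (medDes MedCom : Int) (name : String) : List String :=
  (l.filter (fun _ => classify_employee medDes MedCom == name)).map
    (fun x => (PySem.List.pyGet? x 1).getD "")

def ListaCellNine (listDadosAux : List (List String)) (medDes : Int) (MedCom : Int) : List String × List (List String) :=
  let top_left := cellA listDadosAux medDes MedCom "top_left"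
  let top_middle := cellA listDadosAux medDes MedCom "top_middle"
  let middle_left := cellA listDadosAux medDes MedCom "middle_left"
  let middle_middle := cellA listDadosAux medDes MedCom "middle_middle"
  let top_right := cellA listDadosAux medDes MedCom "top_right"
  let middle_right := cellA listDadosAux medDes MedCom "middle_right"
  let bottom_left := cellA listDadosAux medDes MedCom "bottom_left"
  let bottom_middle := cellA listDadosAux medDes MedCom "bottom_middle"
  let bottom_right := cellA listDadosAux medDes MedCom "bottom_right"
  (["Enigma", "Forte Potencial", "Alto Potencial", "Questionável", "Mantenedor", "Forte Desempenho",
    "Insuficiente", "Eficaz", "Comprometido"],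
   [top_left, top_middle, top_right, middle_left, middle_middle, middle_right, bottom_left,
    bottom_middle, bottom_right])

-- ===== PORT B =====
def ListaCellNine_alt (listDadosAux : List (List String)) (medDes : Int) (MedCom : Int) : List String × List (List String) :=
  let vals := listDadosAux.map (fun x => (PySem.List.pyGet? x 1).getD "")
  let row : Int := if MedCom ≥ 85 then 0 else if MedCom ≥ 70 then 1 else 2
  let col : Int := if medDes < 70 then 0 else if medDes < 85 then 1 else 2
  -- grid[row][col] = vals, others empty
  let cell := fun (i j : Int) => if row = i ∧ col = j then vals else ([] : List String)
  let grid0 := [cell 0 0, cell 0 1, cell 0 2]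
  let grid1 := [cell 1 0, cell 1 1, cell 1 2]
  let grid2 := [cell 2 0, cell 2 1, cell 2 2]
  (["Enigma", "Forte Potencial", "Alto Potencial", "Questionável", "Mantenedor", "Forte Desempenho",
    "Insuficiente", "Eficaz", "Comprometido"],
   grid0 ++ grid1 ++ grid2)

-- ===== PRECONDITION & SPEC =====
-- Pre_ excludes inputs where A raises IndexError: a row with fewer than 2 entries (x[1]).
def Pre_ListaCellNine (listDadosAux : List (List String)) (medDes : Int) (MedCom : Int) : Prop :=
  ∀ x ∈ listDadosAux, 2 ≤ x.length
instance (listDadosAux : List (List String)) (medDes : Int) (MedCom : Int) : Decidable (Pre_ListaCellNine listDadosAux medDes MedCom) := by unfold Pre_ListaCellNine; infer_instance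
def pvWitness_ListaCellNine : List (List String) × Int × Int := ([["a", "b"], ["c", "d"]], 90, 72)
def Spec_ListaCellNine (listDadosAux : List (List String)) (medDes : Int) (MedCom : Int) (out : List String × List (List String)) : Prop := out = ListaCellNine_alt listDadosAux medDes MedCom
instance (listDadosAux : List (List String)) (medDes : Int) (MedCom : Int) (out : List String × List (List String)) : Decidable (Spec_ListaCellNine listDadosAux medDes MedCom out) := by unfold Spec_ListaCellNine; infer_instance

-- ===== CLAIM (what is proved, stated in full; the proofs are below) =====
def Claim_equal_ListaCellNine : Prop := ∀ (listDadosAux : List (List String)) (medDes : Int) (MedCom : Int), Dom_ListaCellNine listDadosAux medDes MedCom → Pre_ListaCellNine listDadosAux medDes MedCom → Spec_ListaCellNine listDadosAux medDes MedCom (ListaCellNine listDadosAux medDes MedCom)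

-- ===== LEMMAS AND PROOFS =====
theorem filter_const {α : Type} (l : List α) (b : Bool) :
    l.filter (fun _ => b) = if b then l else [] := by
  cases b <;> simp

theorem cellA_eq (l : List (List String)) (medDes MedCom : Int) (name : String) :
    cellA l medDes MedCom name =
      if classify_employee medDes MedCom = name
      then l.map (fun x => (PySem.List.pyGet? x 1).getD "") else [] := by
  unfold cellA
  rw [filter_const]
  by_cases h : classify_employee medDes MedCom = name <;> simp [h]

-- ===== VERDICT (by name: the statement is the Claim_ definition above) =====
set_option maxHeartbeats 2000000 in
theorem classify_eq (skills behavior : Int)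
    (name : String)
    (h : (behavior ≥ 85 ∧ skills ≥ 85 ∧ name = "top_right") ∨
         (behavior ≥ 85 ∧ 70 ≤ skills ∧ skills < 85 ∧ name = "top_middle") ∨
         (behavior ≥ 85 ∧ skills < 70 ∧ name = "top_left") ∨
         (70 ≤ behavior ∧ behavior < 85 ∧ skills ≥ 85 ∧ name = "middle_right") ∨
         (70 ≤ behavior ∧ behavior < 85 ∧ 70 ≤ skills ∧ skills < 85 ∧ name = "middle_middle") ∨
         (70 ≤ behavior ∧ behavior < 85 ∧ skills < 70 ∧ name = "middle_left") ∨
         (behavior < 70 ∧ skills ≥ 85 ∧ name = "bottom_right") ∨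
         (behavior < 70 ∧ 70 ≤ skills ∧ skills < 85 ∧ name = "bottom_middle") ∨
         (behavior < 70 ∧ skills < 70 ∧ name = "bottom_left")) :
    classify_employee skills behavior = name := by
  unfold classify_employee
  rcases h with ⟨a,b,rfl⟩|⟨a,b,c,rfl⟩|⟨a,b,rfl⟩|⟨a,b,c,rfl⟩|⟨a,b,c,d,rfl⟩|⟨a,b,c,rfl⟩|⟨a,b,rfl⟩|⟨a,b,c,rfl⟩|⟨a,b,rfl⟩ <;>
    split_ifs <;> first | rfl | omega

set_option maxHeartbeats 1000000 in
theorem ListaCellNine_spec : Claim_equal_ListaCellNine := by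
  intro l medDes MedCom _ _
  unfold Spec_ListaCellNine ListaCellNine ListaCellNine_alt
  simp only [cellA_eq]
  by_cases hB85 : MedCom ≥ 85 <;> by_cases hB70 : MedCom ≥ 70 <;>
    by_cases hS85 : medDes ≥ 85 <;> by_cases hS70 : medDes ≥ 70 <;>
    (try omega)
  · have hc := classify_eq medDes MedCom "top_right" (Or.inl ⟨hB85, hS85, rfl⟩)
    simp [hc, hB85, show ¬ medDes < 70 from by omega, show ¬ medDes < 85 from by omega]
  · have hc := classify_eq medDes MedCom "top_middle" (Or.inr (Or.inl ⟨hB85, hS70, by omega, rfl⟩))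
    simp [hc, hB85, show ¬ medDes < 70 from by omega, show medDes < 85 from by omega]
  · have hc := classify_eq medDes MedCom "top_left" (Or.inr (Or.inr (Or.inl ⟨hB85, by omega, rfl⟩)))
    simp [hc, hB85, show medDes < 70 from by omega]
  · have hc := classify_eq medDes MedCom "middle_right" (Or.inr (Or.inr (Or.inr (Or.inl ⟨hB70, by omega, hS85, rfl⟩))))
    simp [hc, hB85, hB70, show ¬ medDes < 70 from by omega, show ¬ medDes < 85 from by omega]
  · have hc := classify_eq medDes MedCom "middle_middle" (Or.inr (Or.inr (Or.inr (Or.inr (Or.inl ⟨hB70, by omega, hS70, by omega, rfl⟩)))))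
    simp [hc, hB85, hB70, show ¬ medDes < 70 from by omega, show medDes < 85 from by omega]
  · have hc := classify_eq medDes MedCom "middle_left" (Or.inr (Or.inr (Or.inr (Or.inr (Or.inr (Or.inl ⟨hB70, by omega, by omega, rfl⟩))))))
    simp [hc, hB85, hB70, show medDes < 70 from by omega]
  · have hc := classify_eq medDes MedCom "bottom_right" (Or.inr (Or.inr (Or.inr (Or.inr (Or.inr (Or.inr (Or.inl ⟨by omega, hS85, rfl⟩)))))))
    simp [hc, hB85, hB70, show ¬ medDes < 70 from by omega, show ¬ medDes < 85 from by omega]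
  · have hc := classify_eq medDes MedCom "bottom_middle" (Or.inr (Or.inr (Or.inr (Or.inr (Or.inr (Or.inr (Or.inr (Or.inl ⟨by omega, hS70, by omega, rfl⟩))))))))
    simp [hc, hB85, hB70, show ¬ medDes < 70 from by omega, show medDes < 85 from by omega]
  · have hc := classify_eq medDes MedCom "bottom_left" (Or.inr (Or.inr (Or.inr (Or.inr (Or.inr (Or.inr (Or.inr (Or.inr (⟨by omega, by omega, rfl⟩)))))))))
    simp [hc, hB85, hB70, show medDes < 70 from by omega]
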